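-- pv_equiv track=rewrite | github.com/dl1683/Daily-Coding-Challenge | AccessCodes.py | solution
-- ===== SOURCE A (Python) =====
-- def solution(l):
--     # l.sort()
--     l = l[::-1]
--     length = len(l)
--     count = 0
--     l_count = []
--     for x in range(len(l)):
--         l_count.append(0)
--
--     x = 1
--     while x < (length - 1):
--         y = x + 1
--         while y < length:
--             if l[x] % l[y] == 0:
--                 l_count[x] = l_count[x] + 1
--             y = y + 1
--         x = x + 1
--     x = 0
--     while x < (length - 2):
--         y = x + 1
--         while y < (length - 1):
--             if l[x] % l[y] == 0:
--                 count = count + l_count[y]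
--             y = y + 1
--         x = x + 1
--     return count
-- ===== SOURCE B (Python) =====
-- def solution(l):
--     r = l[::-1]
--     n = len(r)
--     total = 0
--     for y in range(1, n - 1):
--         inc = 0
--         for x in range(y):
--             if r[x] % r[y] == 0:
--                 inc += 1
--         out = 0
--         for z in range(y + 1, n):
--             if r[y] % r[z] == 0:
--                 out += 1
--         total += inc * out
--     return total
-- ===== Notes on version B (the rewrite author's own statement) =====
-- stated objective: alternative
-- what changed: Instead of A's mutated l_count array followed by a second quadratic pair scan that re-tests the first divisibility, B counts chains per middle element y as indegree(y)*outdegree(y) in one pass over y, removing the array and the second pair scan.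
import Mathlib
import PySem

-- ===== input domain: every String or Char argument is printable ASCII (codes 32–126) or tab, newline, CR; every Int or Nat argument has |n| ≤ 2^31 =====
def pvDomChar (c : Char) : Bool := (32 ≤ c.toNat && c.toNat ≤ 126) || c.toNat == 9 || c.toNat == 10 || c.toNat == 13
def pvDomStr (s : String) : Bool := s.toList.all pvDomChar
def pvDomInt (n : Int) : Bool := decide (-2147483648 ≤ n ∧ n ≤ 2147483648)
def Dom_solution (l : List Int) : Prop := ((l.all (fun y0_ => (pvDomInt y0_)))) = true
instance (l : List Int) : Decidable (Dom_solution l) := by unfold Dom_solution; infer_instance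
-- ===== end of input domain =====

-- B counts the length-3 divisibility chains of the reversed list per middle element, as
-- indegree*outdegree, instead of A's mutated count array plus a second quadratic pair scan.

-- ===== PORT A =====
-- Transliteration of A: while loops become folds over their index ranges
-- (List.range' a k = [a, a+1, …, a+k-1]); in-range list indexing l[i] is r.getD i 0;
-- Python '%' is PySem.Int.mod (divisors are nonzero under Pre_solution).
def solution (l : List Int) : Int :=
  let r := l.reverse
  let n := r.length
  -- the append loop building l_count as n zeros
  let lc0 : List Int := (List.range n).foldl (fun lc _ => lc ++ [0]) []
  -- first while pair: l_count[x] += 1 for each x+1 ≤ y < n with l[x] % l[y] == 0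
  let lc := (List.range' 1 (n - 1 - 1)).foldl (fun lc x =>
      (List.range' (x + 1) (n - (x + 1))).foldl (fun lc y =>
        if PySem.Int.mod (r.getD x 0) (r.getD y 0) = 0 then lc.set x (lc.getD x 0 + 1) else lc) lc)
    lc0
  -- second while pair: count += l_count[y]
  (List.range' 0 (n - 2)).foldl (fun c x =>
      (List.range' (x + 1) (n - 1 - (x + 1))).foldl (fun c y =>
        if PySem.Int.mod (r.getD x 0) (r.getD y 0) = 0 then c + lc.getD y 0 else c) c)
    0

-- ===== PORT B =====
def solution_alt (l : List Int) : Int :=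
  let r := l.reverse
  let n := r.length
  (List.range' 1 (n - 1 - 1)).foldl (fun (total : Int) y =>
    let inc := (List.range y).foldl (fun c x =>
        if PySem.Int.mod (r.getD x 0) (r.getD y 0) = 0 then c + 1 else c) 0
    let out := (List.range' (y + 1) (n - (y + 1))).foldl (fun c z =>
        if PySem.Int.mod (r.getD y 0) (r.getD z 0) = 0 then c + 1 else c) 0
    total + inc * out) 0

-- ===== PRECONDITION & SPEC =====
-- Pre_ excludes exactly the inputs on which Python A raises ZeroDivisionError (a zero
-- divisor: a 0 anywhere but the last position of a list of length ≥ 3); B raises there too.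
def Pre_solution (l : List Int) : Prop := 3 ≤ l.length → (0 : Int) ∉ l.dropLast
instance (l : List Int) : Decidable (Pre_solution l) := by unfold Pre_solution; infer_instance
def pvWitness_solution : List Int := [8, 4, 2]
def Spec_solution (l : List Int) (out : Int) : Prop := out = solution_alt l
instance (l : List Int) (out : Int) : Decidable (Spec_solution l out) := by unfold Spec_solution; infer_instance

-- ===== CLAIM (what is proved, stated in full; the proofs are below) =====
def Claim_equal_solution : Prop := ∀ (l : List Int), Dom_solution l → Pre_solution l → Spec_solution l (solution l)



-- ===== LEMMAS AND PROOFS =====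

-- out-degree of a middle element y: its divisors among later positions
def pvOut (P : Nat -> Nat -> Prop) [inst : forall x y, Decidable (P x y)] (n y : Nat) : Int :=
  ((List.range' (y + 1) (n - (y + 1))).map (fun z => if P y z then (1 : Int) else 0)).sum

-- List.getD / List.set facts used for A's mutated l_count array
theorem pvGetDSetSelf (lc : List Int) (x : Nat) (hx : x < lc.length) (a : Int) :
    (lc.set x a).getD x 0 = a := by
  simp [List.getD_eq_getElem?_getD, List.getElem?_set_self', List.getElem?_eq_getElem hx]

theorem pvGetDSetNe (lc : List Int) (x y : Nat) (h : y ≠ x) (a : Int) :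
    (lc.set x a).getD y 0 = lc.getD y 0 := by
  simp [List.getD_eq_getElem?_getD, List.getElem?_set_ne (by omega : x ≠ y)]

theorem pvSetGetDSelf (lc : List Int) (x : Nat) (hx : x < lc.length) :
    lc.set x (lc.getD x 0) = lc := by
  simp [List.getD_eq_getElem?_getD, List.getElem?_eq_getElem hx, List.set_getElem_self]

-- generic fold-to-sum lemmas
theorem pvFoldlIfAdd {a : Type} (p : a -> Prop) [DecidablePred p] (w : a -> Int) :
    forall (xs : List a) (c : Int),
      xs.foldl (fun c y => if p y then c + w y else c) c
        = c + (xs.map (fun y => if p y then w y else 0)).sum := by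
  intro xs
  induction xs with
  | nil => intro c; simp
  | cons x t ih =>
    intro c
    simp only [List.foldl_cons, List.map_cons, List.sum_cons]
    rw [ih]
    split_ifs <;> ring

theorem pvFoldlAdd {a : Type} (g : a -> Int) :
    forall (xs : List a) (c : Int),
      xs.foldl (fun c y => c + g y) c = c + (xs.map g).sum := by
  intro xs
  induction xs with
  | nil => intro c; simp
  | cons x t ih => intro c; simp only [List.foldl_cons, List.map_cons, List.sum_cons]; rw [ih]; ring

theorem pvSumIteMul {a : Type} (p : a -> Prop) [DecidablePred p] (c : Int) :
    forall (xs : List a),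
      (xs.map (fun x => if p x then (1 : Int) else 0)).sum * c
        = (xs.map (fun x => if p x then c else 0)).sum := by
  intro xs
  induction xs with
  | nil => simp
  | cons x t ih =>
    simp only [List.map_cons, List.sum_cons, add_mul]
    rw [ih]
    split_ifs <;> ring

-- the zero-initialisation loop builds n zeros
theorem pvZeros {a : Type} : forall (xs : List a) (acc : List Int),
    xs.foldl (fun lc _ => lc ++ [0]) acc = acc ++ List.replicate xs.length 0 := by
  intro xs
  induction xs with
  | nil => intro acc; simp
  | cons x t ih =>
    intro acc
    simp [List.foldl_cons, ih, List.replicate_succ, List.append_assoc]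

-- inner loop of A's first while pair: repeated conditional increments at index x collapse
theorem pvInner1 (P : Nat -> Prop) [DecidablePred P] (x : Nat) :
    forall (ys : List Nat) (lc : List Int), x < lc.length ->
      ys.foldl (fun lc y => if P y then lc.set x (lc.getD x 0 + 1) else lc) lc
        = lc.set x (lc.getD x 0 + (ys.map (fun y => if P y then (1 : Int) else 0)).sum) := by
  intro ys
  induction ys with
  | nil =>
    intro lc hx
    simp only [List.foldl_nil, List.map_nil, List.sum_nil, add_zero]
    exact (pvSetGetDSelf lc x hx).symm
  | cons y t ih =>
    intro lc hx
    simp only [List.foldl_cons, List.map_cons, List.sum_cons]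
    by_cases h : P y
    · rw [if_pos h, if_pos h, ih _ (by simpa using hx),
        pvGetDSetSelf lc x hx, List.set_set]
      exact congrArg (lc.set x) (by ring)
    · rw [if_neg h, if_neg h, ih _ hx]
      exact congrArg (lc.set x) (by ring)

-- outer loop of A's first while pair: the final value at each processed index
theorem pvOuter1 (g : Nat -> Int) (step : List Int -> Nat -> List Int)
    (hstep : forall lc x, x < lc.length -> step lc x = lc.set x (lc.getD x 0 + g x)) :
    forall (xs : List Nat) (lc : List Int), xs.Nodup -> (forall x, x ∈ xs -> x < lc.length) ->
      forall y, (xs.foldl step lc).getD y 0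
        = if y ∈ xs then lc.getD y 0 + g y else lc.getD y 0 := by
  intro xs
  induction xs with
  | nil => intro lc _ _ y; simp
  | cons x t ih =>
    intro lc hnd hlen y
    have hx : x < lc.length := hlen x (by simp)
    have hxt : x ∉ t := (List.nodup_cons.mp hnd).1
    rw [List.foldl_cons, hstep lc x hx]
    have hlen' : forall z, z ∈ t -> z < (lc.set x (lc.getD x 0 + g x)).length := by
      intro z hz; rw [List.length_set]; exact hlen z (by simp [hz])
    rw [ih _ (List.nodup_cons.mp hnd).2 hlen' y]
    by_cases hyt : y ∈ t
    · have hyx : y ≠ x := fun e => hxt (e ▸ hyt)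
      rw [if_pos hyt, pvGetDSetNe lc x y hyx, if_pos (by simp [hyt])]
    · by_cases hyx : y = x
      · subst hyx
        rw [if_neg hyt, pvGetDSetSelf lc y hx, if_pos (by simp)]
      · rw [if_neg hyt, pvGetDSetNe lc x y hyx, if_neg (by simp [hyt, hyx])]

-- bridges from list-range sums to Finset sums
theorem pvSumRange (f : Nat -> Int) (k : Nat) :
    ((List.range k).map f).sum = ∑ y ∈ Finset.range k, f y := rfl

theorem pvSumRange' (f : Nat -> Int) (a b : Nat) :
    ((List.range' a (b - a)).map f).sum = ∑ y ∈ Finset.Ico a b, f y := rfl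

-- triangle swap over Finset sums
theorem pvTriFin (F : Nat -> Nat -> Int) : forall m : Nat,
    ∑ x ∈ Finset.range m, ∑ y ∈ Finset.Ico (x + 1) m, F x y
      = ∑ y ∈ Finset.range m, ∑ x ∈ Finset.range y, F x y := by
  intro m
  induction m with
  | zero => simp
  | succ m ih =>
    rw [Finset.sum_range_succ, Finset.sum_range_succ, Finset.Ico_self, Finset.sum_empty,
      add_zero, ← ih, ← Finset.sum_add_distrib]
    refine Finset.sum_congr rfl (fun x hx => ?_)
    have := Finset.mem_range.mp hx
    rw [Finset.sum_Ico_succ_top (by omega : x + 1 ≤ m)]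

theorem pvExt1 (F : Nat -> Nat -> Int) (m : Nat) :
    ∑ x ∈ Finset.range (m - 1), ∑ y ∈ Finset.Ico (x + 1) m, F x y
      = ∑ x ∈ Finset.range m, ∑ y ∈ Finset.Ico (x + 1) m, F x y := by
  cases m with
  | zero => rfl
  | succ m => rw [Finset.sum_range_succ, Finset.Ico_self, Finset.sum_empty, add_zero]; rfl

theorem pvExt2 (g : Nat -> Int) (h0 : g 0 = 0) (m : Nat) :
    ∑ y ∈ Finset.Ico 1 m, g y = ∑ y ∈ Finset.range m, g y := by
  cases m with
  | zero => simp
  | succ m =>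
    rw [Finset.range_eq_Ico, Finset.sum_eq_sum_Ico_succ_bot (a := 0) (b := m + 1) (by omega),
      h0, zero_add]

theorem pvTri (F : Nat -> Nat -> Int) (m : Nat) :
    ∑ x ∈ Finset.range (m - 1), ∑ y ∈ Finset.Ico (x + 1) m, F x y
      = ∑ y ∈ Finset.Ico 1 m, ∑ x ∈ Finset.range y, F x y := by
  rw [pvExt1, pvTriFin]
  exact (pvExt2 _ (by simp) m).symm

-- the combinatorial core: A's two quadratic passes equal B's per-middle-element pass
theorem pvMain (P : Nat -> Nat -> Prop) [inst : forall x y, Decidable (P x y)] (n : Nat) :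
    ((List.range' 0 (n - 2)).foldl (fun (c : Int) x =>
        (List.range' (x + 1) (n - 1 - (x + 1))).foldl (fun c y =>
          if P x y then c + (((List.range' 1 (n - 1 - 1)).foldl (fun lc x =>
              (List.range' (x + 1) (n - (x + 1))).foldl (fun lc y =>
                if P x y then lc.set x (lc.getD x 0 + 1) else lc) lc)
            ((List.range n).foldl (fun lc _ => lc ++ [(0 : Int)]) ([] : List Int))).getD y 0) else c) c) 0)
    = (List.range' 1 (n - 1 - 1)).foldl (fun (total : Int) y =>
        total + ((List.range y).foldl (fun c x =>
            if P x y then c + 1 else c) 0)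
          * ((List.range' (y + 1) (n - (y + 1))).foldl (fun c z =>
            if P y z then c + 1 else c) 0)) 0 := by
  have hzeros : (List.range n).foldl (fun lc _ => lc ++ [0]) ([] : List Int)
      = List.replicate n 0 := by
    rw [pvZeros]; simp
  have hlc : forall y, y ∈ List.range' 1 (n - 1 - 1) ->
      (((List.range' 1 (n - 1 - 1)).foldl (fun lc x =>
          (List.range' (x + 1) (n - (x + 1))).foldl (fun lc y =>
            if P x y then lc.set x (lc.getD x 0 + 1) else lc) lc)
        ((List.range n).foldl (fun lc _ => lc ++ [(0 : Int)]) ([] : List Int))).getD y 0) = pvOut P n y := by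
    intro y hy
    rw [hzeros,
      pvOuter1 (pvOut P n) _
        (fun lc x hx => pvInner1 (P x) x (List.range' (x + 1) (n - (x + 1))) lc hx)
        (List.range' 1 (n - 1 - 1)) (List.replicate n 0) (List.nodup_range')
        (by
          intro x hx
          rw [List.length_replicate]
          have := List.mem_range'_1.mp hx
          omega) y,
      if_pos hy]
    simp only [List.getD_eq_getElem?_getD, List.getElem?_replicate]
    split <;> simp
  have hA : ((List.range' 0 (n - 2)).foldl (fun (c : Int) x =>
        (List.range' (x + 1) (n - 1 - (x + 1))).foldl (fun c y =>
          if P x y then c + (((List.range' 1 (n - 1 - 1)).foldl (fun lc x =>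
              (List.range' (x + 1) (n - (x + 1))).foldl (fun lc y =>
                if P x y then lc.set x (lc.getD x 0 + 1) else lc) lc)
            ((List.range n).foldl (fun lc _ => lc ++ [(0 : Int)]) ([] : List Int))).getD y 0) else c) c) 0)
      = ∑ x ∈ Finset.range (n - 2), ∑ y ∈ Finset.Ico (x + 1) (n - 1),
          (if P x y then pvOut P n y else 0) := by
    trans ((List.range' 0 (n - 2)).foldl (fun (c : Int) x => c +
        ∑ y ∈ Finset.Ico (x + 1) (n - 1), (if P x y then pvOut P n y else 0)) 0)
    · refine PySem.List.foldl_congr_mem' _ _ _ _ ?_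
      intro x hx c
      rw [pvFoldlIfAdd (P x) _ _ c, ← pvSumRange' _ (x + 1) (n - 1)]
      congr 1
      refine congrArg _ (List.map_congr_left (fun y hy => ?_))
      have hxm := List.mem_range'_1.mp hx
      have hym := List.mem_range'_1.mp hy
      by_cases h : P x y
      · rw [if_pos h, if_pos h, hlc y (List.mem_range'_1.mpr (by omega))]
      · rw [if_neg h, if_neg h]
    · rw [pvFoldlAdd, ← List.range_eq_range', pvSumRange, zero_add]
  have hB : ((List.range' 1 (n - 1 - 1)).foldl (fun (total : Int) y =>
        total + ((List.range y).foldl (fun c x =>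
            if P x y then c + 1 else c) 0)
          * ((List.range' (y + 1) (n - (y + 1))).foldl (fun c z =>
            if P y z then c + 1 else c) 0)) 0)
      = ∑ y ∈ Finset.Ico 1 (n - 1), ∑ x ∈ Finset.range y,
          (if P x y then pvOut P n y else 0) := by
    trans ((List.range' 1 (n - 1 - 1)).foldl (fun (total : Int) y => total +
        ∑ x ∈ Finset.range y, (if P x y then pvOut P n y else 0)) 0)
    · refine PySem.List.foldl_congr_mem' _ _ _ _ ?_
      intro y hy total
      rw [pvFoldlIfAdd (fun x => P x y) (fun _ => (1 : Int)) _ 0,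
        pvFoldlIfAdd (P y) (fun _ => (1 : Int)) _ 0, zero_add, zero_add,
        pvSumIteMul (fun x => P x y) _ (List.range y), pvSumRange]
      rfl
    · rw [pvFoldlAdd, pvSumRange', zero_add]
  have h2 : n - 2 = n - 1 - 1 := by omega
  rw [h2] at hA
  exact hA.trans ((pvTri _ (n - 1)).trans hB.symm)

-- ===== VERDICT (by name: the statement is the Claim_ definition above) =====
theorem solution_spec : Claim_equal_solution := by
  intro l _ _
  unfold Spec_solution solution solution_alt
  exact pvMain (fun x y => PySem.Int.mod (l.reverse.getD x 0) (l.reverse.getD y 0) = 0)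
    l.reverse.length
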